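-- pv_equiv track=rewrite | github.com/harri37/AdventOfCode | day21.py | dir_changes
-- ===== SOURCE A (Python) =====
-- def dir_changes(sequence):
--     n = 0
--     if sequence == "":
--         return 0
--     prev = sequence[0]
--     i = 1
--     while i < len(sequence):
--         if sequence[i] != prev:
--             n += 1
--         prev = sequence[i]
--         i += 1
--     return n
-- ===== SOURCE B (Python) =====
-- def dir_changes(sequence):
--     # Divide and conquer: split in half, count changes in each half,
--     # plus one if the boundary pair differs.
--     if len(sequence) < 2:
--         return 0
--     m = len(sequence) // 2
--     return dir_changes(sequence[:m]) + dir_changes(sequence[m:]) + (sequence[m - 1] != sequence[m])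
-- ===== Notes on version B (the rewrite author's own statement) =====
-- stated objective: alternative
-- what changed: Replaces A's sequential prev/index while-loop with a divide-and-conquer recursion: split the string in half, recursively count changes in each half, and add one if the pair straddling the split differs.
import Mathlib
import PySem

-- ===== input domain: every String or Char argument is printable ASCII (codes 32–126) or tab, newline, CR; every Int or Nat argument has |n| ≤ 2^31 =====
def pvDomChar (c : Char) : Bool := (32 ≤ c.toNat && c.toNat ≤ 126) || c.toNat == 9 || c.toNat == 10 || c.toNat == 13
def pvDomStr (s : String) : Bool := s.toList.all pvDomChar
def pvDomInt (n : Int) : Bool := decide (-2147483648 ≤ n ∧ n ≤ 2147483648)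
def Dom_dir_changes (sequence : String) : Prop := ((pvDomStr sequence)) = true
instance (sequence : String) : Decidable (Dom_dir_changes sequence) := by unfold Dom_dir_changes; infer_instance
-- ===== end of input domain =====

-- B replaces A's sequential prev/index scan with a divide-and-conquer recursion (alternative; not faster).

-- ===== PORT A =====
-- A's while-loop: carry prev and the running count n, bump n when the current char differs from prev.
def dirChangesLoop (prev : Char) : List Char → Int → Int
  | [], n => n
  | c :: rest, n => dirChangesLoop c rest (if c != prev then n + 1 else n)

def dir_changes (sequence : String) : Int :=
  match sequence.toList with
  | [] => 0                                -- sequence == "" guard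
  | c :: rest => dirChangesLoop c rest 0   -- prev = sequence[0], scan from i = 1

-- ===== PORT B =====
-- Source B's divide and conquer on the character list; the slices s[:m] / s[m:] with
-- 0 ≤ m ≤ len are exactly take/drop, and the always-in-range s[m-1], s[m] are getElem?.
def pvDC (cs : List Char) : Int :=
  if cs.length < 2 then 0
  else
    let m := cs.length / 2
    pvDC (cs.take m) + pvDC (cs.drop m) +
      (if cs[m - 1]? ≠ cs[m]? then 1 else 0)
termination_by cs.length
decreasing_by
  · simp only [List.length_take]; omega
  · simp only [List.length_drop]; omega

def dir_changes_alt (sequence : String) : Int := pvDC sequence.toList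

-- ===== PRECONDITION & SPEC =====
def Spec_dir_changes (sequence : String) (out : Int) : Prop := out = dir_changes_alt sequence
instance (sequence : String) (out : Int) : Decidable (Spec_dir_changes sequence out) := by unfold Spec_dir_changes; infer_instance

-- ===== CLAIM (what is proved, stated in full; the proofs are below) =====
def Claim_equal_dir_changes : Prop := ∀ (sequence : String), Dom_dir_changes sequence → Spec_dir_changes sequence (dir_changes sequence)

-- ===== LEMMAS AND PROOFS =====
-- Reference count of adjacent differing pairs.
def countAdj : List Char → Int
  | [] => 0
  | [_] => 0
  | a :: b :: t => (if a ≠ b then 1 else 0) + countAdj (b :: t)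

theorem dirChangesLoop_eq (cs : List Char) : ∀ (prev : Char) (n : Int),
    dirChangesLoop prev cs n = n + countAdj (prev :: cs) := by
  induction cs with
  | nil => intro prev n; simp [dirChangesLoop, countAdj]
  | cons c rest ih =>
    intro prev n
    by_cases h : c = prev
    · subst h; simp [dirChangesLoop, countAdj, ih]
    · have hne : (c == prev) = false := by simp [h]
      have h' : prev ≠ c := fun e => h e.symm
      simp [dirChangesLoop, countAdj, ih, h, h']
      ring

theorem countAdj_append (xs ys : List Char) (hx : xs ≠ []) (hy : ys ≠ []) :
    countAdj (xs ++ ys) =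
      countAdj xs + countAdj ys + (if xs.getLast? ≠ ys.head? then 1 else 0) := by
  induction xs with
  | nil => exact absurd rfl hx
  | cons a t ih =>
    cases t with
    | nil =>
      cases ys with
      | nil => exact absurd rfl hy
      | cons b u => simp [countAdj, List.getLast?, Option.some_inj]; ring
    | cons b u =>
      have hrec := ih (by simp)
      simp only [List.cons_append, countAdj] at hrec ⊢
      rw [hrec, List.getLast?_cons_cons]
      ring

theorem pvDC_eq (cs : List Char) : pvDC cs = countAdj cs := by
  induction hn : cs.length using Nat.strong_induction_on generalizing cs with
  | _ n ih =>
    rw [pvDC]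
    by_cases h2 : cs.length < 2
    · simp only [h2, if_true]
      match cs, h2 with
      | [], _ => rfl
      | [a], _ => rfl
    · simp only [h2, if_false]
      rw [not_lt] at h2
      set m := cs.length / 2 with hm
      have hm1 : 1 ≤ m := by omega
      have hmlt : m < cs.length := by omega
      have htake : (cs.take m).length = m := by simp; omega
      have hdrop : (cs.drop m).length = cs.length - m := by simp
      have ht := ih (cs.take m).length (by omega) (cs.take m) rfl
      have hd := ih (cs.drop m).length (by omega) (cs.drop m) rfl
      have hxs : cs.take m ≠ [] := by
        intro e; rw [e] at htake; simp at htake; omega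
      have hys : cs.drop m ≠ [] := by
        intro e; rw [e] at hdrop; simp at hdrop; omega
      have happ := countAdj_append (cs.take m) (cs.drop m) hxs hys
      rw [List.take_append_drop] at happ
      have hlast : (cs.take m).getLast? = cs[m - 1]? := by
        rw [List.getLast?_eq_getElem?, htake, List.getElem?_take]
        have hlt : m - 1 < m := by omega
        simp [hlt]
      have hhead : (cs.drop m).head? = cs[m]? := by
        simp [List.head?_drop]
      rw [happ, ht, hd, hlast, hhead]

-- ===== VERDICT (by name: the statement is the Claim_ definition above) =====
theorem dir_changes_spec : Claim_equal_dir_changes := by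
  intro s _
  unfold Spec_dir_changes dir_changes dir_changes_alt
  rw [pvDC_eq]
  cases h : s.toList with
  | nil => rfl
  | cons c rest =>
    show dirChangesLoop c rest 0 = countAdj (c :: rest)
    rw [dirChangesLoop_eq]; ring
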